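-- pv_equiv track=rewrite | github.com/yu-0811/competitive-programming-library | algo-library/python/graph/csr.py | csr
-- ===== SOURCE A (Python) =====
-- def csr(N: int, graphEdges: list[list[int]]):
--   start = [0]*(N+1)
--   # endList := 辺を始点の昇順にソートした時の終点のリスト
--   endList = [0]*len(graphEdges)
--
--   # start[i+1] := 頂点 i を始点とする辺の数 となるように構築
--   for u,v in graphEdges: # u -> v への辺
--     start[u+1] += 1
--   # start[i] := 始点の頂点番号が i 未満である辺の数 になるように累積和を取る
--   # このとき、start[i] = endList で頂点 i が始点となる最小の index (0-index)
--   for i in range(1,N+1):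
--     start[i] += start[i-1]
--
--   # pointer[i] := 始点を i とする辺の endList への挿入位置
--   pointer = start[:]
--   for u,v in graphEdges:
--     endList[pointer[u]] = v
--     pointer[u] += 1
--
--   return start, endList
-- ===== SOURCE B (Python) =====
-- def csr(N, graphEdges):
--     # bucket the edge targets per source vertex, preserving edge order
--     adj = [[] for _ in range(N)]
--     for u, v in graphEdges:
--         adj[u].append(v)
--     # start = prefix sums over bucket sizes
--     start = [0]
--     for bucket in adj:
--         start.append(start[-1] + len(bucket))
--     endList = [w for bucket in adj for w in bucket]
--     return start, endList
-- ===== Notes on version B (the rewrite author's own statement) =====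
-- stated objective: simpler
-- what changed: B buckets edge targets into per-vertex adjacency lists in one pass and returns the prefix sums of the bucket sizes plus the concatenated buckets, replacing A's three passes (count, in-place cumulative sum, pointer-driven scatter into a preallocated array).
-- outside the precondition, e.g. on csr(2, [[-2, 5]]): A returns ([0, 0, 1], [5]), B returns ([0, 1, 1], [5])
import Mathlib
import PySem

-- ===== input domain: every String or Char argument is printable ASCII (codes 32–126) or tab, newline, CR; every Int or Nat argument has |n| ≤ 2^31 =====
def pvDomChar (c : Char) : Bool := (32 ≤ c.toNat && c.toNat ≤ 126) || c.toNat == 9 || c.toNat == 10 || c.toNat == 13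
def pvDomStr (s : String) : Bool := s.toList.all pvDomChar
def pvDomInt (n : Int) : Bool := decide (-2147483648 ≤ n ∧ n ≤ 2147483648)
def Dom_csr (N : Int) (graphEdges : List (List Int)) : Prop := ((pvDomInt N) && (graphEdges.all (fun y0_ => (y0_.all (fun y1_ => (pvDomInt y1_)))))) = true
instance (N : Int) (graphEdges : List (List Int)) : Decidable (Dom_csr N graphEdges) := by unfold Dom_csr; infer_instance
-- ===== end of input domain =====

-- B buckets the targets per source vertex and returns the prefix sums of the bucket
-- sizes plus the concatenated buckets, instead of A's count / cumulative-sum /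
-- pointer-scatter passes (objective: simpler; same return value on Pre_csr).

-- ===== PORT A =====
-- Hand port of A's three loops; each loop body is a named step function transcribed
-- literally, list indexing via PySem.List.pyGetD/pySetD (exact Python index semantics
-- for the in-range indices Pre_csr admits).  A malformed edge (length ≠ 2, a Python
-- ValueError on unpacking) leaves the state unchanged — such inputs are outside Pre_csr.

-- body of 'for u,v in graphEdges: start[u+1] += 1'
def pvStepCount (s : List Int) (e : List Int) : List Int :=
  match e with
  | [u, _v] => PySem.List.pySetD s (u + 1) (PySem.List.pyGetD s (u + 1) 0 + 1)
  | _ => s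

-- body of 'for i in range(1,N+1): start[i] += start[i-1]'
def pvStepPrefix (s : List Int) (i : Int) : List Int :=
  PySem.List.pySetD s i (PySem.List.pyGetD s i 0 + PySem.List.pyGetD s (i - 1) 0)

-- body of 'for u,v in graphEdges: endList[pointer[u]] = v; pointer[u] += 1'
-- (state = (endList, pointer); pointer = start[:] is the copy A makes)
def pvStepPlace (st : List Int × List Int) (e : List Int) : List Int × List Int :=
  match e with
  | [u, v] =>
    let p := PySem.List.pyGetD st.2 u 0
    (PySem.List.pySetD st.1 p v, PySem.List.pySetD st.2 u (p + 1))
  | _ => st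

def csr (N : Int) (graphEdges : List (List Int)) : List Int × List Int :=
  let start0 : List Int := List.replicate (N + 1).toNat 0
  let endList0 : List Int := List.replicate graphEdges.length 0
  let start1 := graphEdges.foldl pvStepCount start0
  let start2 := (PySem.List.pyRange 1 (N + 1) 1).foldl pvStepPrefix start1
  let ep := graphEdges.foldl pvStepPlace (endList0, start2)
  (start2, ep.1)

-- ===== PORT B =====
-- port of Source B: bucket pass, prefix-sum pass over the buckets, concatenation.

-- body of 'for u,v in graphEdges: adj[u].append(v)'
def pvStepAdj (a : List (List Int)) (e : List Int) : List (List Int) :=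
  match e with
  | [u, v] => PySem.List.pySetD a u (PySem.List.pyGetD a u [] ++ [v])
  | _ => a

-- body of 'for bucket in adj: start.append(start[-1] + len(bucket))'
def pvStepStart (s : List Int) (b : List Int) : List Int :=
  s ++ [PySem.List.pyGetD s (-1) 0 + (b.length : Int)]

def csr_alt (N : Int) (graphEdges : List (List Int)) : List Int × List Int :=
  let adj0 : List (List Int) := List.replicate N.toNat []
  let adj := graphEdges.foldl pvStepAdj adj0
  let start := adj.foldl pvStepStart [0]
  (start, adj.flatten)

-- ===== PRECONDITION & SPEC =====
-- Pre_ restricts to the natural CSR input domain: N ≥ 0 and every edge a pair [u, v]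
-- with source 0 ≤ u < N.  Outside it A raises (ValueError on edges that are not pairs,
-- IndexError on sources ≥ N or = -1) except that on sources ≤ -2 A returns accidental
-- values produced by Python negative-index wraparound, which B does not reproduce.
def Pre_csr (N : Int) (graphEdges : List (List Int)) : Prop :=
  0 ≤ N ∧ ∀ e ∈ graphEdges, e.length = 2 ∧ 0 ≤ e.headD 0 ∧ e.headD 0 < N
instance (N : Int) (graphEdges : List (List Int)) : Decidable (Pre_csr N graphEdges) := by
  unfold Pre_csr; infer_instance

def pvWitness_csr : Int × List (List Int) := (3, [[0, 7], [2, -1], [0, 5], [1, 0]])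

def Spec_csr (N : Int) (graphEdges : List (List Int)) (out : List Int × List Int) : Prop := out = csr_alt N graphEdges
instance (N : Int) (graphEdges : List (List Int)) (out : List Int × List Int) : Decidable (Spec_csr N graphEdges out) := by unfold Spec_csr; infer_instance

-- ===== CLAIM (what is proved, stated in full; the proofs are below) =====
def Claim_equal_csr : Prop := ∀ (N : Int) (graphEdges : List (List Int)), Dom_csr N graphEdges → Pre_csr N graphEdges → Spec_csr N graphEdges (csr N graphEdges)

-- ===== LEMMAS AND PROOFS =====

-- helper notions: per-vertex edge count, prefix count, per-vertex target bucket, validity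
def pvCnt (es : List (List Int)) (u : Int) : Int := (es.countP (fun e => e.headD 0 == u) : Int)

def pvPsum (es : List (List Int)) (j : Int) : Int := (es.countP (fun e => decide (e.headD 0 < j)) : Int)

def pvBkt (es : List (List Int)) (u : Int) : List Int :=
  (es.filter (fun e => e.headD 0 == u)).map (fun e => e.getD 1 0)

def pvVld (N : Int) (es : List (List Int)) : Prop :=
  ∀ e ∈ es, e.length = 2 ∧ 0 ≤ e.headD 0 ∧ e.headD 0 < N

theorem pvCnt_nonneg (es : List (List Int)) (u : Int) : 0 ≤ pvCnt es u := by
  simp [pvCnt]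

theorem pvPsum_nonneg (es : List (List Int)) (j : Int) : 0 ≤ pvPsum es j := by
  simp [pvPsum]

theorem pvCnt_append (es : List (List Int)) (u v w : Int) :
    pvCnt (es ++ [[u, v]]) w = pvCnt es w + if w = u then 1 else 0 := by
  unfold pvCnt
  rw [List.countP_append]
  by_cases hw : w = u
  · simp [List.countP_cons, hw]
  · simp [List.countP_cons, hw, Ne.symm hw]

theorem pvBkt_append (es : List (List Int)) (u v w : Int) :
    pvBkt (es ++ [[u, v]]) w = pvBkt es w ++ if w = u then [v] else [] := by
  unfold pvBkt
  rw [List.filter_append]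
  by_cases hw : w = u
  · simp [hw]
  · simp [hw, Ne.symm hw]

theorem pvBkt_length (es : List (List Int)) (u : Int) :
    ((pvBkt es u).length : Int) = pvCnt es u := by
  simp [pvBkt, pvCnt, ← List.countP_eq_length_filter]

theorem pvPsum_succ (es : List (List Int)) (j : Int) :
    pvPsum es (j + 1) = pvPsum es j + pvCnt es j := by
  unfold pvPsum pvCnt
  induction es with
  | nil => simp
  | cons e es ih =>
    simp only [List.countP_cons] at *
    push_cast at *
    by_cases h1 : e.headD 0 < j + 1 <;> by_cases h2 : e.headD 0 < j <;> by_cases h3 : e.headD 0 = j <;>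
      simp [h1, h2, h3, List.headD_eq_head?_getD] at * <;> omega

theorem pvPsum_zero {N : Int} (es : List (List Int)) (h : pvVld N es) : pvPsum es 0 = 0 := by
  unfold pvPsum
  rw [List.countP_eq_zero.2]
  · rfl
  · intro e he
    have := (h e he).2.1
    simp [List.headD_eq_head?_getD] at *
    omega

theorem pvPsum_mono (es : List (List Int)) {j j' : Int} (h : j ≤ j') :
    pvPsum es j ≤ pvPsum es j' := by
  unfold pvPsum
  have := List.countP_mono_left (l := es) (p := fun e => decide (e.headD 0 < j)) (q := fun e => decide (e.headD 0 < j'))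
    (by intro e he hd; simp at *; omega)
  omega

theorem pvPsum_top {N : Int} (es : List (List Int)) (h : pvVld N es) :
    pvPsum es N = (es.length : Int) := by
  unfold pvPsum
  rw [List.countP_eq_length.2]
  intro e he
  have := (h e he).2.2
  simp [List.headD_eq_head?_getD] at *
  omega

theorem pvPair (e : List Int) (h : e.length = 2) : ∃ u v, e = [u, v] := by
  rcases e with _ | ⟨a, e⟩
  · simp at h
  rcases e with _ | ⟨b, e⟩
  · simp at h
  rcases e with _ | ⟨c, e⟩
  · exact ⟨a, b, rfl⟩
  · simp at h

theorem pvSetMapRange {α : Type} {f : Nat → α} {n k : Nat} (hk : k < n) (x : α) :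
    ((List.range n).map f).set k x = (List.range n).map (fun j => if j = k then x else f j) := by
  apply List.ext_getElem
  · simp
  · intro i h1 h2
    simp only [List.getElem_set, List.getElem_map, List.getElem_range]
    by_cases hik : k = i
    · simp [hik]
    · rw [if_neg hik, if_neg (show ¬ i = k from fun hh => hik hh.symm)]

theorem pvGetD_map_range {α : Type} {f : Nat → α} {n k : Nat} (hk : k < n) (d : α) :
    ((List.range n).map f).getD k d = f k := by
  rw [List.getD_eq_getElem _ _ (by simpa using hk)]
  simp

theorem pvGetD_set_ne {α : Type} (l : List α) {i q : Nat} (h : i ≠ q) (x d : α) :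
    (l.set i x).getD q d = l.getD q d := by
  simp [List.getD_eq_getElem?_getD, List.getElem?_set_ne h]

theorem pvGetD_set_self {α : Type} (l : List α) {i : Nat} (h : i < l.length) (x d : α) :
    (l.set i x).getD i d = x := by
  simp [List.getD_eq_getElem?_getD, List.getElem?_set_self h]

theorem pvVld_prefix {N : Int} {es : List (List Int)} {e : List Int}
    (h : pvVld N (es ++ [e])) : pvVld N es :=
  fun x hx => h x (List.mem_append_left _ hx)

theorem pvVld_last {N : Int} {es : List (List Int)} {e : List Int}
    (h : pvVld N (es ++ [e])) : e.length = 2 ∧ 0 ≤ e.headD 0 ∧ e.headD 0 < N :=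
  h e (List.mem_append_right _ (List.mem_singleton_self e))

-- A, loop 1 (counting)

theorem pvA_count {N : Int} (hN : 0 ≤ N) (es : List (List Int)) (h : pvVld N es) :
    es.foldl pvStepCount (List.replicate (N + 1).toNat 0)
    = (List.range (N + 1).toNat).map
        (fun (j : Nat) => if j = 0 then 0 else pvCnt es ((j : Int) - 1)) := by
  induction es using List.reverseRecOn with
  | nil =>
    apply List.ext_getElem
    · simp
    · intro i h1 h2
      simp only [List.foldl_nil, List.getElem_replicate, List.getElem_map, List.getElem_range,
        pvCnt, List.countP_nil, Nat.cast_zero, ite_self]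
  | append_singleton es e ih =>
    have hVes := pvVld_prefix h
    have he := pvVld_last h
    obtain ⟨u, v, rfl⟩ := pvPair e he.1
    have hu0 : (0:Int) ≤ u := by simpa using he.2.1
    have huN : u < N := by simpa using he.2.2
    rw [List.foldl_append, ih hVes, List.foldl_cons, List.foldl_nil]
    have hcast : ((u.toNat : Nat) : Int) = u := by omega
    have hlt : u.toNat + 1 < (N + 1).toNat := by omega
    rw [pvStepCount,
      show u + 1 = ((u.toNat + 1 : Nat) : Int) from by omega,
      PySem.List.pySetD_natCast, PySem.List.pyGetD_natCast,
      pvGetD_map_range hlt, pvSetMapRange hlt]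
    apply List.map_congr_left
    intro j hj
    simp only [List.mem_range] at hj
    by_cases hj0 : j = 0
    · subst hj0
      simp [pvCnt_append]
    · by_cases hju : j = u.toNat + 1
      · subst hju
        have h1 : ((u.toNat + 1 : Nat) : Int) - 1 = u := by omega
        simp [if_neg hj0, h1, pvCnt_append, hu0]
      · have h1 : ¬ ((j : Int) - 1 = u) := by omega
        simp only [if_neg hj0, if_neg hju, pvCnt_append, if_neg h1, add_zero]

-- B, bucket pass

theorem pvB_adj {N : Int} (hN : 0 ≤ N) (es : List (List Int)) (h : pvVld N es) :
    es.foldl pvStepAdj (List.replicate N.toNat [])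
    = (List.range N.toNat).map (fun (i : Nat) => pvBkt es (i : Int)) := by
  induction es using List.reverseRecOn with
  | nil =>
    apply List.ext_getElem
    · simp
    · intro i h1 h2
      simp only [List.foldl_nil, List.getElem_replicate, List.getElem_map, List.getElem_range,
        pvBkt, List.filter_nil, List.map_nil]
  | append_singleton es e ih =>
    have hVes := pvVld_prefix h
    have he := pvVld_last h
    obtain ⟨u, v, rfl⟩ := pvPair e he.1
    have hu0 : (0:Int) ≤ u := by simpa using he.2.1
    have huN : u < N := by simpa using he.2.2
    rw [List.foldl_append, ih hVes, List.foldl_cons, List.foldl_nil]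
    have hcast : ((u.toNat : Nat) : Int) = u := by omega
    have hlt : u.toNat < N.toNat := by omega
    rw [pvStepAdj,
      show u = ((u.toNat : Nat) : Int) from by omega,
      PySem.List.pySetD_natCast, PySem.List.pyGetD_natCast,
      pvGetD_map_range hlt, pvSetMapRange hlt, hcast]
    apply List.map_congr_left
    intro j hj
    simp only [List.mem_range] at hj
    by_cases hju : j = u.toNat
    · subst hju
      simp [pvBkt_append, hcast]
    · have h1 : ¬ ((j : Int) = u) := by omega
      simp only [if_neg hju, pvBkt_append, if_neg h1, List.append_nil]

-- A, loop 2: invariant of the in-place prefix-sum loop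

theorem pvPrefix_inv {N : Int} (hN : 0 ≤ N) (es : List (List Int)) (h : pvVld N es) :
    ∀ t, t ≤ N.toNat →
    (List.range t).foldl (fun (s : List Int) (k : Nat) => pvStepPrefix s (1 + (k : Int)))
      ((List.range (N.toNat + 1)).map
        (fun (j : Nat) => if j = 0 then 0 else pvCnt es ((j : Int) - 1)))
    = (List.range (N.toNat + 1)).map
        (fun (j : Nat) => if j ≤ t then pvPsum es (j : Int)
                  else (if j = 0 then 0 else pvCnt es ((j : Int) - 1))) := by
  intro t
  induction t with
  | zero =>
    intro _
    simp only [List.range_zero, List.foldl_nil]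
    apply List.map_congr_left
    intro j hj
    by_cases hj0 : j = 0
    · subst hj0
      simp [pvPsum_zero es h]
    · have h1 : ¬ (j ≤ 0) := by omega
      simp [hj0, h1]
  | succ t iht =>
    intro ht
    rw [List.range_succ (n := t), List.foldl_append, iht (by omega), List.foldl_cons, List.foldl_nil]
    have hidx : 1 + (t : Int) = ((t + 1 : Nat) : Int) := by omega
    have hidx2 : 1 + (t : Int) - 1 = ((t : Nat) : Int) := by omega
    have hlt : t + 1 < N.toNat + 1 := by omega
    have hlt2 : t < N.toNat + 1 := by omega
    rw [pvStepPrefix, hidx2, PySem.List.pyGetD_natCast, pvGetD_map_range hlt2,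
      hidx, PySem.List.pySetD_natCast, PySem.List.pyGetD_natCast,
      pvGetD_map_range hlt, pvSetMapRange hlt]
    apply List.map_congr_left
    intro j hj
    simp only [List.mem_range] at hj
    by_cases hjt : j = t + 1
    · subst hjt
      have h1 : ¬ (t + 1 ≤ t) := by omega
      have h2 : ((t + 1 : Nat) : Int) - 1 = (t : Int) := by omega
      have h3 : ((t + 1 : Nat) : Int) = (t : Int) + 1 := by omega
      simp [h1, h2, h3, pvPsum_succ, Nat.le_refl]
      ring
    · by_cases hle : j ≤ t
      · simp [hjt, hle, Nat.le_succ_of_le hle]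
      · have : ¬ (j ≤ t + 1) := by omega
        simp [hjt, hle, this]

-- A, loop 2 (in-place prefix sums)

theorem pvA_prefix {N : Int} (hN : 0 ≤ N) (es : List (List Int)) (h : pvVld N es) :
    (PySem.List.pyRange 1 (N + 1) 1).foldl pvStepPrefix
      ((List.range (N + 1).toNat).map
        (fun (j : Nat) => if j = 0 then 0 else pvCnt es ((j : Int) - 1)))
    = (List.range (N + 1).toNat).map (fun (j : Nat) => pvPsum es (j : Int)) := by
  have hm : (N + 1).toNat = N.toNat + 1 := by omega
  have hm2 : (N + 1 - 1).toNat = N.toNat := by omega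
  rw [PySem.List.pyRange_one, hm2, List.foldl_map, hm,
    pvPrefix_inv hN es h N.toNat (le_refl _)]
  apply List.map_congr_left
  intro j hj
  simp only [List.mem_range] at hj
  simp [Nat.lt_succ_iff.1 hj]

-- B, start pass: prefix sums of the bucket lengths

theorem pvB_start (es : List (List Int)) (m : Nat) :
    ((List.range m).map (fun (i : Nat) => pvBkt es (i : Int))).foldl pvStepStart [0]
    = (List.range (m + 1)).map
        (fun (j : Nat) => (((List.range j).map (fun (i : Nat) => ((pvBkt es (i : Int)).length : Int))).sum)) := by
  induction m with
  | zero => simp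
  | succ m ih =>
    rw [List.range_succ (n := m), List.map_append, List.foldl_append, ih]
    simp only [List.map_cons, List.map_nil, List.foldl_cons, List.foldl_nil]
    have hlast : PySem.List.pyGetD
        ((List.range (m + 1)).map
          (fun (j : Nat) => (((List.range j).map (fun (i : Nat) => ((pvBkt es (i : Int)).length : Int))).sum))) (-1) 0
        = ((List.range m).map (fun (i : Nat) => ((pvBkt es (i : Int)).length : Int))).sum := by
      rw [List.range_succ, List.map_append]
      simp [PySem.List.pyGetD_neg_one_append_singleton]
    rw [pvStepStart, hlast, List.range_succ (n := m + 1), List.map_append]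
    simp [List.range_succ]

-- partial sums of bucket lengths are pvPsum

theorem pvSum_bkt_eq_psum {N : Int} (es : List (List Int)) (h : pvVld N es) (j : Nat) :
    ((List.range j).map (fun (i : Nat) => ((pvBkt es (i : Int)).length : Int))).sum = pvPsum es (j : Int) := by
  induction j with
  | zero => simp [pvPsum_zero es h]
  | succ j ih =>
    rw [List.range_succ, List.map_append, List.sum_append, ih]
    have : ((j + 1 : Nat) : Int) = (j : Int) + 1 := by omega
    simp [this, pvPsum_succ, pvBkt_length]

-- indexing a concatenation of buckets

theorem pvFlatten_getD (bs : List (List Int)) (j : Nat) (hj : j < bs.length)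
    (k : Nat) (hk : k < (bs.getD j []).length) :
    bs.flatten.getD ((((bs.take j).map List.length).sum) + k) 0 = (bs.getD j []).getD k 0 := by
  induction bs generalizing j with
  | nil => simp at hj
  | cons b bs ih =>
    cases j with
    | zero =>
      simp only [List.take_zero, List.map_nil, List.sum_nil, Nat.zero_add, List.flatten_cons]
      rw [List.getD_append _ _ _ _ (by simpa using hk)]
      simp
    | succ j =>
      simp only [List.take_succ_cons, List.map_cons, List.sum_cons, List.flatten_cons]
      rw [Nat.add_assoc, List.getD_append_right _ _ _ _ (by omega), Nat.add_sub_cancel_left]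
      exact ih j (by simpa using hj) (by simpa using hk)

-- every position below pvPsum es m lies in some bucket interval

theorem pvLocate {N : Int} (es : List (List Int)) (h : pvVld N es) (m : Nat) (q : Nat)
    (hq : (q : Int) < pvPsum es (m : Int)) :
    ∃ j : Nat, j < m ∧ pvPsum es (j : Int) ≤ (q : Int) ∧ (q : Int) < pvPsum es ((j : Int) + 1) := by
  induction m with
  | zero =>
    rw [show ((0 : Nat) : Int) = 0 by rfl, pvPsum_zero es h] at hq
    omega
  | succ m ih =>
    by_cases hq' : (q : Int) < pvPsum es (m : Int)
    · obtain ⟨j, hj, h1, h2⟩ := ih hq'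
      exact ⟨j, by omega, h1, h2⟩
    · refine ⟨m, by omega, by omega, ?_⟩
      have : ((m + 1 : Nat) : Int) = (m : Int) + 1 := by omega
      rw [this] at hq
      exact hq

theorem pvA_scatter {N : Int} (hN : 0 ≤ N) (es : List (List Int)) (h : pvVld N es)
    (es' : List (List Int)) (h' : pvVld N es')
    (hle : ∀ u : Int, pvCnt es' u ≤ pvCnt es u)
    (E : List Int) (hE : E.length = es.length) :
    (es'.foldl pvStepPlace (E, (List.range (N + 1).toNat).map (fun (j : Nat) => pvPsum es (j : Int)))).2
      = (List.range (N + 1).toNat).map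
          (fun (j : Nat) => pvPsum es (j : Int) + if (j : Int) < N then pvCnt es' (j : Int) else 0)
    ∧ (es'.foldl pvStepPlace (E, (List.range (N + 1).toNat).map (fun (j : Nat) => pvPsum es (j : Int)))).1.length
      = E.length
    ∧ (∀ u : Int, 0 ≤ u → u < N → ∀ k : Nat, (k : Int) < pvCnt es' u →
        (es'.foldl pvStepPlace (E, (List.range (N + 1).toNat).map (fun (j : Nat) => pvPsum es (j : Int)))).1.getD
          (pvPsum es u + k).toNat 0 = (pvBkt es' u).getD k 0)
    ∧ (∀ q : Nat, (∀ u : Int, 0 ≤ u → u < N →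
          ¬(pvPsum es u ≤ (q : Int) ∧ (q : Int) < pvPsum es u + pvCnt es' u)) →
        (es'.foldl pvStepPlace (E, (List.range (N + 1).toNat).map (fun (j : Nat) => pvPsum es (j : Int)))).1.getD q 0
          = E.getD q 0) := by
  induction es' using List.reverseRecOn with
  | nil =>
    refine ⟨?_, rfl, ?_, ?_⟩
    · apply List.map_congr_left
      intro j hj
      simp [pvCnt]
    · intro u hu0 huN k hk
      have := pvCnt_nonneg ([] : List (List Int)) u
      simp [pvCnt] at hk
      omega
    · intro q hq
      rfl
  | append_singleton es' e ih =>
    have hV' := pvVld_prefix h'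
    obtain ⟨u, v, rfl⟩ := pvPair e (pvVld_last h').1
    have hu0 : (0:Int) ≤ u := by simpa using (pvVld_last h').2.1
    have huN : u < N := by simpa using (pvVld_last h').2.2
    have hle' : ∀ w, pvCnt es' w ≤ pvCnt es w := by
      intro w
      have := hle w
      rw [pvCnt_append] at this
      split_ifs at this <;> omega
    have hcu : pvCnt es' u + 1 ≤ pvCnt es u := by
      have := hle u
      rw [pvCnt_append, if_pos rfl] at this
      omega
    obtain ⟨ihP, ihLen, ihIn, ihOut⟩ := ih hV' hle'
    have hun : u.toNat < (N + 1).toNat := by omega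
    have hucast : ((u.toNat : Nat) : Int) = u := by omega
    rw [List.foldl_append, List.foldl_cons, List.foldl_nil]
    -- the pointer read
    have hp : PySem.List.pyGetD
        (es'.foldl pvStepPlace (E, (List.range (N + 1).toNat).map (fun (j : Nat) => pvPsum es (j : Int)))).2 u 0
        = pvPsum es u + pvCnt es' u := by
      rw [ihP, show u = ((u.toNat : Nat) : Int) from by omega, PySem.List.pyGetD_natCast,
        pvGetD_map_range hun, hucast, if_pos huN]
    have hp0 : 0 ≤ pvPsum es u + pvCnt es' u := by
      have := pvPsum_nonneg es u
      have := pvCnt_nonneg es' u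
      omega
    have hpS : pvPsum es u + pvCnt es' u < pvPsum es (u + 1) := by
      rw [pvPsum_succ]
      omega
    have hpL : pvPsum es u + pvCnt es' u < (E.length : Int) := by
      have h1 := pvPsum_mono es (show u + 1 ≤ N by omega)
      have h2 := pvPsum_top es h
      omega
    simp only [pvStepPlace, hp]
    refine ⟨?_, ?_, ?_, ?_⟩
    · -- pointer after the write
      rw [ihP, show u = ((u.toNat : Nat) : Int) from by omega, PySem.List.pySetD_natCast,
        pvSetMapRange hun]
      apply List.map_congr_left
      intro j hj
      simp only [List.mem_range] at hj
      by_cases hju : j = u.toNat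
      · subst hju
        rw [if_pos rfl, hucast, if_pos huN, pvCnt_append, if_pos rfl]
        ring
      · rw [if_neg hju, pvCnt_append, if_neg (show ¬ ((j : Int) = ((u.toNat : Nat) : Int)) from by omega)]
        simp
    · rw [PySem.List.pySetD_of_nonneg _ _ hp0]
      simpa using ihLen
    · intro w hw0 hwN k hk
      rw [PySem.List.pySetD_of_nonneg _ _ hp0]
      rw [pvCnt_append] at hk
      have hlenF : (es'.foldl pvStepPlace (E, (List.range (N + 1).toNat).map (fun (j : Nat) => pvPsum es (j : Int)))).1.length = E.length := ihLen
      by_cases hwu : w = u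
      · subst hwu
        rw [if_pos rfl] at hk
        rcases eq_or_lt_of_le (show (k : Int) + 1 ≤ pvCnt es' w + 1 from by omega) with hkk | hkk
        · -- k is exactly the new slot
          have hkc : (k : Int) = pvCnt es' w := by omega
          have hidx : (pvPsum es w + (k : Int)).toNat = (pvPsum es w + pvCnt es' w).toNat := by
            rw [hkc]
          rw [hidx, pvGetD_set_self _ (by rw [hlenF]; omega), pvBkt_append, if_pos rfl]
          have hklen : k = (pvBkt es' w).length := by
            have := pvBkt_length es' w
            omega
          rw [List.getD_append_right _ _ _ _ (by omega), hklen]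
          simp
        · -- k is an old slot of the same bucket
          have hkc : (k : Int) < pvCnt es' w := by omega
          have hne : (pvPsum es w + pvCnt es' w).toNat ≠ (pvPsum es w + (k : Int)).toNat := by
            have := pvPsum_nonneg es w
            have := pvCnt_nonneg es' w
            omega
          rw [pvGetD_set_ne _ hne, ihIn w hw0 hwN k hkc, pvBkt_append, if_pos rfl]
          have hklen : k < (pvBkt es' w).length := by
            have := pvBkt_length es' w
            omega
          rw [List.getD_append _ _ _ _ hklen]
      · rw [if_neg (show ¬ (w = u) from hwu)] at hk
        have hq1 : pvPsum es w + (k : Int) < pvPsum es (w + 1) := by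
          rw [pvPsum_succ]
          have := hle' w
          omega
        have hne' : (pvPsum es u + pvCnt es' u).toNat ≠ (pvPsum es w + (k : Int)).toNat := by
          have hpw0 := pvPsum_nonneg es w
          have hck0 : (0:Int) ≤ (k : Int) := by omega
          by_cases hlt : w < u
          · have := pvPsum_mono es (show w + 1 ≤ u by omega)
            have := pvPsum_nonneg es u
            have := pvCnt_nonneg es' u
            omega
          · have hgt : u < w := by omega
            have := pvPsum_mono es (show u + 1 ≤ w by omega)
            omega
        rw [pvGetD_set_ne _ hne', ihIn w hw0 hwN k hk, pvBkt_append,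
          if_neg (show ¬ (w = u) from hwu)]
        simp
    · intro q hq
      rw [PySem.List.pySetD_of_nonneg _ _ hp0]
      have hqu := hq u hu0 huN
      rw [pvCnt_append, if_pos rfl] at hqu
      have hne : (pvPsum es u + pvCnt es' u).toNat ≠ q := by
        have := pvCnt_nonneg es' u
        have := pvPsum_nonneg es u
        intro hcontra
        apply hqu
        constructor <;> omega
      rw [pvGetD_set_ne _ hne]
      apply ihOut
      intro w hw0 hwN
      have := hq w hw0 hwN
      rw [pvCnt_append] at this
      split_ifs at this <;> [skip; exact this]
      intro hcontra
      apply this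
      omega

theorem pvCast_sum_len {N : Int} (es : List (List Int)) (h : pvVld N es) (j : Nat) :
    ((List.range j).map (fun (i : Nat) => (pvBkt es (i : Int)).length)).sum
      = (pvPsum es (j : Int)).toNat := by
  have h1 := pvSum_bkt_eq_psum es h j
  have h2 : ((((List.range j).map (fun (i : Nat) => (pvBkt es (i : Int)).length)).sum : Nat) : Int)
      = ((List.range j).map (fun (i : Nat) => ((pvBkt es (i : Int)).length : Int))).sum := by
    rw [Nat.cast_list_sum, List.map_map]
    rfl
  omega

theorem csr_eq (N : Int) (es : List (List Int))
    (hN : 0 ≤ N) (h : pvVld N es) : csr N es = csr_alt N es := by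
  simp only [csr, csr_alt]
  rw [pvA_count hN es h, pvA_prefix hN es h, pvB_adj hN es h, pvB_start es N.toNat]
  have hn : (N + 1).toNat = N.toNat + 1 := by omega
  have hNN : ((N.toNat : Nat) : Int) = N := by omega
  obtain ⟨_, hLen, hIn, _⟩ := pvA_scatter hN es h es h (fun u => le_rfl)
    (List.replicate es.length (0 : Int)) (by simp)
  rw [Prod.mk.injEq]
  constructor
  · rw [hn]
    apply List.map_congr_left
    intro j hj
    exact (pvSum_bkt_eq_psum es h j).symm
  · have hfl : ((List.range N.toNat).map (fun (i : Nat) => pvBkt es (i : Int))).flatten.length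
        = es.length := by
      rw [List.length_flatten, List.map_map]
      have h2 := pvCast_sum_len es h N.toNat
      have h3 : (List.map (List.length ∘ fun (i : Nat) => pvBkt es (i : Int)) (List.range N.toNat)).sum
          = (pvPsum es ((N.toNat : Nat) : Int)).toNat := h2
      rw [h3, hNN, pvPsum_top es h]
      omega
    apply List.ext_getElem
    · rw [hLen, hfl, List.length_replicate]
    · intro q h1 h2
      have hqL : q < es.length := by
        rw [hLen, List.length_replicate] at h1
        exact h1
      have hq : (q : Int) < pvPsum es ((N.toNat : Nat) : Int) := by
        rw [hNN, pvPsum_top es h]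
        omega
      obtain ⟨j, hjm, hjl, hjr⟩ := pvLocate es h N.toNat q hq
      have hj0 : (0 : Int) ≤ (j : Int) := by omega
      have hjN : ((j : Nat) : Int) < N := by omega
      have hknn : (0 : Int) ≤ (q : Int) - pvPsum es (j : Int) := by omega
      set k : Nat := ((q : Int) - pvPsum es (j : Int)).toNat with hkdef
      have hk1 : (k : Int) = (q : Int) - pvPsum es (j : Int) := Int.toNat_of_nonneg hknn
      have hkc : (k : Int) < pvCnt es (j : Int) := by
        have := pvPsum_succ es (j : Int)
        omega
      have hA := hIn (j : Int) hj0 hjN k hkc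
      have hidx : (pvPsum es (j : Int) + (k : Int)).toNat = q := by omega
      rw [hidx] at hA
      rw [show (List.foldl pvStepPlace (List.replicate es.length (0:Int),
            (List.range (N + 1).toNat).map (fun (j : Nat) => pvPsum es (j : Int))) es).1[q]
          = (List.foldl pvStepPlace (List.replicate es.length (0:Int),
            (List.range (N + 1).toNat).map (fun (j : Nat) => pvPsum es (j : Int))) es).1.getD q 0
          from (List.getD_eq_getElem _ _ h1).symm, hA]
      have hkb : k < (pvBkt es (j : Int)).length := by
        have := pvBkt_length es (j : Int)
        omega
      have hbsj : ((List.range N.toNat).map (fun (i : Nat) => pvBkt es (i : Int))).getD j []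
          = pvBkt es (j : Int) := pvGetD_map_range hjm []
      have htake : ((List.range N.toNat).map (fun (i : Nat) => pvBkt es (i : Int))).take j
          = (List.range j).map (fun (i : Nat) => pvBkt es (i : Int)) := by
        rw [← List.map_take, List.take_range, show min j N.toNat = j from by omega]
      have hflat := pvFlatten_getD ((List.range N.toNat).map (fun (i : Nat) => pvBkt es (i : Int)))
        j (by simp [hjm]) k (by rw [hbsj]; exact hkb)
      rw [hbsj, htake, List.map_map] at hflat
      have hsum : (List.map (List.length ∘ fun (i : Nat) => pvBkt es (i : Int)) (List.range j)).sum
          = (pvPsum es (j : Int)).toNat := pvCast_sum_len es h j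
      rw [hsum] at hflat
      have hpj := pvPsum_nonneg es (j : Int)
      have hidx2 : (pvPsum es (j : Int)).toNat + k = q := by omega
      rw [hidx2] at hflat
      rw [← hflat]
      exact (List.getD_eq_getElem _ _ h2)

-- ===== VERDICT (by name: the statement is the Claim_ definition above) =====
theorem csr_spec : Claim_equal_csr := by
  intro N graphEdges _hDom hPre
  exact csr_eq N graphEdges hPre.1 hPre.2
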